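-- pv_equiv track=rewrite | github.com/yoshi65/gmail-calendar-sync | src/models/carshare.py | get_provider_from_domain
-- ===== SOURCE A (Python) =====
-- from enum import Enum
--
-- class CarShareProvider(str, Enum):
--     """Supported car sharing providers."""
--
--     MITSUI_CARSHARES = "mitsui_carshares"
--     TIMES_CAR = "times_car"
--
-- def get_provider_from_domain(domain: str) -> CarShareProvider | None:
--     """Get car share provider from email domain."""
--     domain_mapping = {
--         "carshares.jp": CarShareProvider.MITSUI_CARSHARES,
--         "share.timescar.jp": CarShareProvider.TIMES_CAR,
--     }
--
--     for provider_domain, provider in domain_mapping.items():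
--         if domain == provider_domain or domain.endswith("." + provider_domain):
--             return provider
--
--     return None
-- ===== SOURCE B (Python) =====
-- from enum import Enum
--
--
-- class CarShareProvider(str, Enum):
--     """Supported car sharing providers."""
--
--     MITSUI_CARSHARES = "mitsui_carshares"
--     TIMES_CAR = "times_car"
--
--
-- def get_provider_from_domain(domain: str) -> CarShareProvider | None:
--     """Get car share provider from email domain (suffix-candidate lookup)."""
--     domain_mapping = {
--         "carshares.jp": CarShareProvider.MITSUI_CARSHARES,
--         "share.timescar.jp": CarShareProvider.TIMES_CAR,
--     }
--
--     provider = domain_mapping.get(domain)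
--     if provider is not None:
--         return provider
--
--     for i, ch in enumerate(domain):
--         if ch == ".":
--             provider = domain_mapping.get(domain[i + 1:])
--             if provider is not None:
--                 return provider
--
--     return None
-- ===== Notes on version B (the rewrite author's own statement) =====
-- stated objective: idiomatic
-- what changed: Instead of looping over the mapping's entries testing equality/endswith for each key, B looks the domain itself and each dot-boundary suffix of the domain up in the dict, returning the first hit.
import Mathlib
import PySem

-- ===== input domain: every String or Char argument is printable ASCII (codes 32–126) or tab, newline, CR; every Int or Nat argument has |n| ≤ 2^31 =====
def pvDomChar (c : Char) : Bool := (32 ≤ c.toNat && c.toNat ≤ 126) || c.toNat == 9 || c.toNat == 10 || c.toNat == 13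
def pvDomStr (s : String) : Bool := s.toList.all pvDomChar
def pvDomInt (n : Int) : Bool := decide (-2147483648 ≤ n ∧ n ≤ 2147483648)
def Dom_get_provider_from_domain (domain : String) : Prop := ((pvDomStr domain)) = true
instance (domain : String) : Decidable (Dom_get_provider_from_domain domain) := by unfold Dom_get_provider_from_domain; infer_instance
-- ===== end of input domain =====

-- B replaces A's loop over mapping entries (equality/endswith test per key) with direct dict
-- lookups of the domain and of each dot-boundary suffix of the domain (idiomatic, same cost).


-- ===== PORT A =====
-- A's dict, iterated in insertion order as (key, value) pairs
def gpItemsA : List (String × String) :=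
  [("carshares.jp", "mitsui_carshares"), ("share.timescar.jp", "times_car")]

def gpLoopA (domain : String) : List (String × String) → Option String
  | [] => none
  | (pd, p) :: rest =>
    if domain == pd || PySem.Str.endswith domain ("." ++ pd) then some p
    else gpLoopA domain rest

def get_provider_from_domain (domain : String) : Option String :=
  gpLoopA domain gpItemsA

-- ===== PORT B =====
-- B's dict; strings are handled as their code-point lists throughout the port
def gpMappingB : PySem.Dict (List Char) String :=
  (PySem.Dict.empty.insert "carshares.jp".toList "mitsui_carshares").insert
    "share.timescar.jp".toList "times_car"

-- the 'for i, ch in enumerate(domain)' loop: at each '.', look up the suffix after it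
def gpScanB : List Char → Option String
  | [] => none
  | c :: rest =>
    if c == '.' then
      match gpMappingB.get? rest with
      | some p => some p
      | none => gpScanB rest
    else gpScanB rest

def get_provider_from_domain_alt (domain : String) : Option String :=
  match gpMappingB.get? domain.toList with
  | some p => some p
  | none => gpScanB domain.toList

-- ===== PRECONDITION & SPEC =====
def Spec_get_provider_from_domain (domain : String) (out : Option String) : Prop := out = get_provider_from_domain_alt domain
instance (domain : String) (out : Option String) : Decidable (Spec_get_provider_from_domain domain out) := by unfold Spec_get_provider_from_domain; infer_instance

-- ===== CLAIM (what is proved, stated in full; the proofs are below) =====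
def Claim_equal_get_provider_from_domain : Prop := ∀ (domain : String), Dom_get_provider_from_domain domain → Spec_get_provider_from_domain domain (get_provider_from_domain domain)

-- ===== LEMMAS AND PROOFS =====

-- B's scan equals "first of the two dot-boundary suffix tests"
theorem gpScanB_eq (cs : List Char) :
    gpScanB cs =
      (if ['.', 'c', 'a', 'r', 's', 'h', 'a', 'r', 'e', 's', '.', 'j', 'p'] <:+ cs then
        some "mitsui_carshares"
       else if ['.', 's', 'h', 'a', 'r', 'e', '.', 't', 'i', 'm', 'e', 's', 'c', 'a', 'r', '.', 'j', 'p'] <:+ cs then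
        some "times_car"
       else none) := by
  induction cs with
  | nil => simp [gpScanB]
  | cons c rest ih =>
    by_cases hc : c = '.'
    · subst hc
      by_cases h1 : rest = ['c', 'a', 'r', 's', 'h', 'a', 'r', 'e', 's', '.', 'j', 'p']
      · subst h1
        simp [gpScanB, gpMappingB, PySem.Dict.get?_insert, List.suffix_cons_iff]
      · by_cases h2 : rest = ['s', 'h', 'a', 'r', 'e', '.', 't', 'i', 'm', 'e', 's', 'c', 'a', 'r', '.', 'j', 'p']
        · subst h2
          have hd : ¬ ['.', 'c', 'a', 'r', 's', 'h', 'a', 'r', 'e', 's', '.', 'j', 'p'] <:+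
              ['.', 's', 'h', 'a', 'r', 'e', '.', 't', 'i', 'm', 'e', 's', 'c', 'a', 'r', '.', 'j', 'p'] := by
            decide
          simp [gpScanB, gpMappingB, PySem.Dict.get?_insert, List.suffix_cons_iff, hd]
        · have q1 : ['.', 'c', 'a', 'r', 's', 'h', 'a', 'r', 'e', 's', '.', 'j', 'p'] ≠ '.' :: rest := by
            intro h; exact h1 (by injection h with _ h'; exact h'.symm)
          have q2 : ['.', 's', 'h', 'a', 'r', 'e', '.', 't', 'i', 'm', 'e', 's', 'c', 'a', 'r', '.', 'j', 'p'] ≠ '.' :: rest := by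
            intro h; exact h2 (by injection h with _ h'; exact h'.symm)
          simp [gpScanB, gpMappingB, PySem.Dict.get?_insert, h1, h2,
                List.suffix_cons_iff, q1, q2, ih]
    · have q1 : ['.', 'c', 'a', 'r', 's', 'h', 'a', 'r', 'e', 's', '.', 'j', 'p'] ≠ c :: rest := by
        intro h; exact hc (by injection h with h' _; exact h'.symm)
      have q2 : ['.', 's', 'h', 'a', 'r', 'e', '.', 't', 'i', 'm', 'e', 's', 'c', 'a', 'r', '.', 'j', 'p'] ≠ c :: rest := by
        intro h; exact hc (by injection h with h' _; exact h'.symm)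
      simp [gpScanB, hc, List.suffix_cons_iff, q1, q2, ih]

-- ===== VERDICT (by name: the statement is the Claim_ definition above) =====
theorem get_provider_from_domain_spec : Claim_equal_get_provider_from_domain := by
  intro domain _
  unfold Spec_get_provider_from_domain
  unfold get_provider_from_domain get_provider_from_domain_alt gpItemsA
  by_cases h1 : domain = "carshares.jp"
  · subst h1; decide
  · by_cases h2 : domain = "share.timescar.jp"
    · subst h2; decide
    · have hl1 : domain.toList ≠ ['c', 'a', 'r', 's', 'h', 'a', 'r', 'e', 's', '.', 'j', 'p'] := by
        intro h
        have h' := congrArg String.ofList h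
        rw [String.ofList_toList] at h'
        exact h1 (h'.trans (by decide))
      have hl2 : domain.toList ≠ ['s', 'h', 'a', 'r', 'e', '.', 't', 'i', 'm', 'e', 's', 'c', 'a', 'r', '.', 'j', 'p'] := by
        intro h
        have h' := congrArg String.ofList h
        rw [String.ofList_toList] at h'
        exact h2 (h'.trans (by decide))
      have g1 : gpMappingB.get? domain.toList = none := by
        simp [gpMappingB, PySem.Dict.get?_insert, hl1, hl2]
      have b1 : (domain == "carshares.jp") = false := by simp [h1]
      have b2 : (domain == "share.timescar.jp") = false := by simp [h2]
      by_cases s1 : ['.', 'c', 'a', 'r', 's', 'h', 'a', 'r', 'e', 's', '.', 'j', 'p'] <:+ domain.toList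
      · have e1 : PySem.Chars.endswith domain.toList ['.', 'c', 'a', 'r', 's', 'h', 'a', 'r', 'e', 's', '.', 'j', 'p'] = true :=
          (PySem.Chars.endswith_iff _ _).2 s1
        simp [gpLoopA, b1, e1, g1, gpScanB_eq, s1]
      · have e1 : PySem.Chars.endswith domain.toList ['.', 'c', 'a', 'r', 's', 'h', 'a', 'r', 'e', 's', '.', 'j', 'p'] = false := by
          rw [Bool.eq_false_iff]
          intro h
          exact s1 ((PySem.Chars.endswith_iff _ _).1 h)
        by_cases s2 : ['.', 's', 'h', 'a', 'r', 'e', '.', 't', 'i', 'm', 'e', 's', 'c', 'a', 'r', '.', 'j', 'p'] <:+ domain.toList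
        · have e2 : PySem.Chars.endswith domain.toList ['.', 's', 'h', 'a', 'r', 'e', '.', 't', 'i', 'm', 'e', 's', 'c', 'a', 'r', '.', 'j', 'p'] = true :=
            (PySem.Chars.endswith_iff _ _).2 s2
          simp [gpLoopA, b1, b2, e1, e2, g1, gpScanB_eq, s1, s2]
        · have e2 : PySem.Chars.endswith domain.toList ['.', 's', 'h', 'a', 'r', 'e', '.', 't', 'i', 'm', 'e', 's', 'c', 'a', 'r', '.', 'j', 'p'] = false := by
            rw [Bool.eq_false_iff]
            intro h
            exact s2 ((PySem.Chars.endswith_iff _ _).1 h)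
          simp [gpLoopA, b1, b2, e1, e2, g1, gpScanB_eq, s1, s2]
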